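-- pv_equiv track=rewrite | github.com/Minjoo522/Algorithm | 프로그래머스/unrated/181834. l로 만들기/l로 만들기.py | solution
-- ===== SOURCE A (Python) =====
-- def solution(myString):
--     answer = ''
--     for str in myString:
--         if str < 'l':
--             answer += 'l'
--             continue
--         answer += str
--     return answer
-- ===== SOURCE B (Python) =====
-- def solution(myString):
--     table = {i: 'l' for i in range(ord('l'))}
--     return myString.translate(table)
-- ===== Notes on version B (the rewrite author's own statement) =====
-- stated objective: idiomatic
-- what changed: Replaced the explicit branchy character loop that builds the answer by repeated string concatenation with a precomputed translation table (every codepoint below ord('l') maps to 'l') consumed by a single str.translate pass.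
import Mathlib
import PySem

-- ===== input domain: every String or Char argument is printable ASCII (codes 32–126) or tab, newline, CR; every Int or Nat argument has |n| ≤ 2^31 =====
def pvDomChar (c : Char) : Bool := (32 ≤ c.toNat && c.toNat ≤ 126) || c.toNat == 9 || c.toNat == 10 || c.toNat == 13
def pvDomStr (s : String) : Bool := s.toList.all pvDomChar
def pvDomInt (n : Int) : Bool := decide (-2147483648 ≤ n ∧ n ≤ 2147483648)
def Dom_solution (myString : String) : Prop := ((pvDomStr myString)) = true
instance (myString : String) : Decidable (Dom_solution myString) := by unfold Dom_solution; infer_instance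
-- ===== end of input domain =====

-- B replaces A's branchy accumulator loop with a precomputed translation table consumed by one translate pass (idiomatic; return value only).

-- ===== PORT A =====
-- answer accumulated as a character list ('' → []; 'answer += x' → ans ++ [x]); String.ofList at the end is exact
def solution (myString : String) : String :=
  String.ofList (myString.toList.foldl
    (fun ans c => if c < 'l' then ans ++ ['l'] else ans ++ [c]) [])

-- ===== PORT B =====
-- table = {i: 'l' for i in range(ord('l'))}
def solutionTable : PySem.Dict Int Char :=
  (PySem.List.pyRange 0 108 1).foldl (fun d i => d.insert i 'l') PySem.Dict.empty

-- myString.translate(table): each char is looked up by codepoint, unchanged when absent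
def solution_alt (myString : String) : String :=
  String.ofList (myString.toList.map (fun c => ((solutionTable.get? (c.toNat : Int)).getD c)))

-- ===== PRECONDITION & SPEC =====
def Spec_solution (myString : String) (out : String) : Prop := out = solution_alt myString
instance (myString : String) (out : String) : Decidable (Spec_solution myString out) := by unfold Spec_solution; infer_instance

-- ===== CLAIM (what is proved, stated in full; the proofs are below) =====
def Claim_equal_solution : Prop := ∀ (myString : String), Dom_solution myString → Spec_solution myString (solution myString)

-- ===== LEMMAS AND PROOFS =====

-- lookup in a table built by inserting 0..n-1 ↦ 'l'
theorem get?_rangeTable (n : Nat) (k : Int) :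
    ((PySem.List.pyRange 0 (n : Int) 1).foldl (fun d i => d.insert i 'l') PySem.Dict.empty).get? k
      = if 0 ≤ k ∧ k < (n : Int) then some 'l' else none := by
  induction n with
  | zero => simp
  | succ n ih =>
    have h : ((n : Int) + 1) = ((n + 1 : Nat) : Int) := by push_cast; ring
    rw [← h, PySem.List.pyRange_one_succ_right (by positivity), List.foldl_append]
    simp only [List.foldl_cons, List.foldl_nil, PySem.Dict.get?_insert, ih]
    split_ifs with h1 h2 h3 <;> first | rfl | omega

theorem pointwise (c : Char) :
    (if c < 'l' then 'l' else c) = ((solutionTable.get? (c.toNat : Int)).getD c) := by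
  have : solutionTable.get? (c.toNat : Int)
      = if 0 ≤ (c.toNat : Int) ∧ (c.toNat : Int) < (108 : Int) then some 'l' else none :=
    get?_rangeTable 108 (c.toNat : Int)
  rw [solutionTable] at this ⊢
  rw [this]
  have hlt : c < 'l' ↔ c.toNat < 108 := by
    constructor <;> intro h <;> exact h
  by_cases hc : c < 'l'
  · have : (c.toNat : Int) < 108 := by exact_mod_cast hlt.mp hc
    simp [hc, this]
  · have : ¬ (c.toNat : Int) < 108 := by
      intro h; exact hc (hlt.mpr (by exact_mod_cast h))
    simp [hc, this]

-- ===== VERDICT (by name: the statement is the Claim_ definition above) =====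
theorem solution_spec : Claim_equal_solution := by
  intro s _
  unfold Spec_solution solution solution_alt
  congr 1
  have := PySem.List.foldl_append_singleton_eq_map (l := s.toList)
    (f := fun c => if c < 'l' then 'l' else c) (acc := ([] : List Char))
  calc s.toList.foldl (fun ans c => if c < 'l' then ans ++ ['l'] else ans ++ [c]) []
      = s.toList.foldl (fun ans c => ans ++ [if c < 'l' then 'l' else c]) [] := by
        refine PySem.List.foldl_congr_mem _ _ _ _ ?_
        intro ans c _; by_cases h : c < 'l' <;> simp [h]
    _ = s.toList.map (fun c => if c < 'l' then 'l' else c) := by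
        simpa using this
    _ = s.toList.map (fun c => ((solutionTable.get? (c.toNat : Int)).getD c)) := by
        exact List.map_congr_left (fun c _ => pointwise c)
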